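-- pv_equiv track=rewrite | github.com/Ryan111111/DataStructure_python | 栈和队列/求最大子矩阵的大小.py | maxRecSize
-- ===== SOURCE A (Python) =====
-- def maxRecSize(map):
--     if map == None or len(map)==0 or len(map[0])==0 :
--         return 0
--     height = [0]*len(map[0])
--
--     for i in range(len(map)):
--         for j in range(len(map[0])):
--             height[j] += map[i][j]
--
--     return  height
-- ===== SOURCE B (Python) =====
-- def maxRecSize(map):
--     if map == None or len(map) == 0 or len(map[0]) == 0:
--         return 0
--     w = len(map[0])
--
--     def colsum(lo, hi):
--         # column sums of rows lo..hi-1, by divide and conquer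
--         if hi - lo == 1:
--             return [map[lo][j] for j in range(w)]
--         mid = (lo + hi) // 2
--         a = colsum(lo, mid)
--         b = colsum(mid, hi)
--         return [a[j] + b[j] for j in range(w)]
--
--     return colsum(0, len(map))
-- ===== Notes on version B (the rewrite author's own statement) =====
-- stated objective: alternative
-- what changed: Divide-and-conquer: rows are split in half recursively, each half's column sums computed independently and merged by elementwise addition, instead of A's linear row-by-row accumulation into a mutated height array.
-- outside the precondition, e.g. on maxRecSize([]): A returns 0, B returns 0; on maxRecSize([[]]): A returns 0, B returns 0; on maxRecSize([[1, 2], [3]]): A raises IndexError, B raises IndexError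
import Mathlib
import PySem

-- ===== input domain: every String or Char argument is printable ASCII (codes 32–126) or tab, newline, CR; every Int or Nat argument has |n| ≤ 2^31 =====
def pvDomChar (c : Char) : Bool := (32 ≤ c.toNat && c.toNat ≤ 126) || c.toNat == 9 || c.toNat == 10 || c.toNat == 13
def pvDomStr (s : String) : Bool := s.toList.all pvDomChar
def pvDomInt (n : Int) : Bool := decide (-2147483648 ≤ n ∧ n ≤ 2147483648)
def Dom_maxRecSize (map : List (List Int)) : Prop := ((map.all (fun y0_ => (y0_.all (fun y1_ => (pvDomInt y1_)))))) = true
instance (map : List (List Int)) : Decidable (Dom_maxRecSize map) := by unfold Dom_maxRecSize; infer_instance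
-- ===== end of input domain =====

-- B replaces A's linear row-by-row accumulation into a mutated height array by a
-- divide-and-conquer over the rows (split in half, column-sum each half, merge
-- by elementwise addition); equivalence is proved on non-empty, non-ragged inputs (Pre_).

-- ===== PORT A =====
def maxRecSize (map : List (List Int)) : List Int :=
  if map.length = 0 ∨ (map.headD []).length = 0 then []  -- Python returns the int 0 here (outside Pre_)
  else
    (PySem.List.pyRange 0 (map.length : Int) 1).foldl
      (fun height i =>
        (PySem.List.pyRange 0 ((map.headD []).length : Int) 1).foldl
          (fun hgt j =>
            PySem.List.pySetD hgt j
              (PySem.List.pyGetD hgt j 0 + PySem.List.pyGetD (PySem.List.pyGetD map i []) j 0))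
          height)
      (List.replicate (map.headD []).length 0)

-- ===== PORT B =====
-- the inner helper colsum(lo, hi) of Source B (w = len(map[0]));
-- Python only ever calls it with lo < hi, so the `hi ≤ lo` branch is a pure
-- totality guard that no admitted call reaches
def pvColsum (map : List (List Int)) (w lo hi : Nat) : List Int :=
  if hi - lo = 1 then
    (List.range w).map (fun j : Nat =>
      PySem.List.pyGetD (PySem.List.pyGetD map (lo : Int) []) (j : Int) 0)
  else if hi ≤ lo then []  -- unreachable totality guard (Python would recurse forever)
  else
    let mid := (lo + hi) / 2
    let a := pvColsum map w lo mid
    let b := pvColsum map w mid hi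
    (List.range w).map (fun j => a.getD j 0 + b.getD j 0)
termination_by hi - lo
decreasing_by all_goals omega

def maxRecSize_alt (map : List (List Int)) : List Int :=
  if map.length = 0 ∨ (map.headD []).length = 0 then []  -- same guard as A (outside Pre_)
  else pvColsum map (map.headD []).length 0 map.length

-- ===== PRECONDITION & SPEC =====
-- Pre_ excludes empty inputs (map == [] or map[0] == []), where A returns the int 0
-- rather than a list, and ragged inputs with a row shorter than the first row,
-- where A raises IndexError (and B raises IndexError too).
def Pre_maxRecSize (map : List (List Int)) : Prop :=
  map ≠ [] ∧ map.headD [] ≠ [] ∧ ∀ row ∈ map, (map.headD []).length ≤ row.length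
instance (map : List (List Int)) : Decidable (Pre_maxRecSize map) := by
  unfold Pre_maxRecSize; infer_instance
def pvWitness_maxRecSize : List (List Int) := [[1, 2], [3, 4]]
def Spec_maxRecSize (map : List (List Int)) (out : List Int) : Prop := out = maxRecSize_alt map
instance (map : List (List Int)) (out : List Int) : Decidable (Spec_maxRecSize map out) := by unfold Spec_maxRecSize; infer_instance

-- ===== CLAIM (what is proved, stated in full; the proofs are below) =====
def Claim_equal_maxRecSize : Prop := ∀ (map : List (List Int)), Dom_maxRecSize map → Pre_maxRecSize map → Spec_maxRecSize map (maxRecSize map)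

-- ===== LEMMAS AND PROOFS =====

-- column entry read with defaults (value of map[i][j] used by both ports' folds)
def pvG (map : List (List Int)) (i j : Nat) : Int := (map.getD i []).getD j 0

-- partial column sum: S map n j = sum of map[i][j] over i < n
def pvS (map : List (List Int)) (n j : Nat) : Int :=
  (List.range n).foldl (fun s i => s + pvG map i j) 0

theorem pvS_succ (map : List (List Int)) (n j : Nat) :
    pvS map (n + 1) j = pvS map n j + pvG map n j := by
  simp [pvS, List.range_succ]

-- setting the cell just past a prefix
theorem pv_set_at_length {α : Type} (l₁ : List α) (a b : α) (l₂ : List α) :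
    (l₁ ++ a :: l₂).set l₁.length b = l₁ ++ b :: l₂ := by
  induction l₁ with
  | nil => simp
  | cons x xs ih => simp [ih]

-- inner loop of A in Nat form: setting every index j < n to h[j] + v j
theorem pv_inner (v : Nat → Int) :
    ∀ (n : Nat) (h : List Int), n ≤ h.length →
      (List.range n).foldl (fun acc j => acc.set j (acc.getD j 0 + v j)) h
        = (List.range n).map (fun j => h.getD j 0 + v j) ++ h.drop n := by
  intro n
  induction n with
  | zero => intro h _; simp
  | succ n ih =>
    intro h hn
    rw [List.range_succ, List.foldl_append, List.map_append, ih h (by omega)]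
    have hlen : ((List.range n).map (fun j => h.getD j 0 + v j)).length = n := by simp
    have hget :
        ((List.range n).map (fun j => h.getD j 0 + v j) ++ h.drop n).getD n 0 = h.getD n 0 := by
      rw [List.getD_eq_getElem?_getD, List.getElem?_append_right (by omega)]
      simp [List.getD_eq_getElem?_getD]
    have hdrop : h.drop n = h[n] :: h.drop (n + 1) :=
      List.drop_eq_getElem_cons (by omega)
    rw [hdrop] at hget
    simp only [List.foldl_cons, List.foldl_nil, hdrop, hget]
    have hset := pv_set_at_length ((List.range n).map (fun j => h.getD j 0 + v j))
      h[n] (h.getD n 0 + v n) (h.drop (n + 1))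
    rw [hlen] at hset
    rw [hset]
    simp

-- A's outer loop in Nat form equals the list of partial column sums
theorem pv_outer (map : List (List Int)) (w : Nat) :
    ∀ n : Nat,
      (List.range n).foldl
        (fun h i => (List.range w).foldl
          (fun acc j => acc.set j (acc.getD j 0 + pvG map i j)) h)
        (List.replicate w 0)
      = (List.range w).map (fun j => pvS map n j) := by
  intro n
  induction n with
  | zero =>
    simp only [List.range_zero, List.foldl_nil]
    have hz : (fun j => pvS map 0 j) = (fun _ : Nat => (0 : Int)) := by
      funext j; simp [pvS]
    rw [hz, List.map_const', List.length_range]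
  | succ n ih =>
    rw [List.range_succ, List.foldl_append, ih]
    simp only [List.foldl_cons, List.foldl_nil]
    rw [pv_inner (pvG map n) w _ (by simp)]
    rw [show (((List.range w).map fun j => pvS map n j).drop w) = ([] : List Int) by simp,
      List.append_nil]
    refine List.map_congr_left ?_
    intro j hj
    have hj' : j < w := List.mem_range.mp hj
    simp [List.getD_eq_getElem?_getD, hj', pvS_succ]

-- partial sums over a row segment
theorem pvS_Ico (map : List (List Int)) (n j : Nat) :
    pvS map n j = ∑ i ∈ Finset.range n, pvG map i j := by
  induction n with
  | zero => simp [pvS]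
  | succ n ih => rw [pvS_succ, ih, Finset.sum_range_succ]

-- B's divide-and-conquer computes the column sums of the row segment [lo, hi)
theorem pvColsum_eq (map : List (List Int)) (w : Nat) :
    ∀ d lo hi, hi - lo = d → lo < hi →
      pvColsum map w lo hi
        = (List.range w).map (fun j => ∑ i ∈ Finset.Ico lo hi, pvG map i j) := by
  intro d
  induction d using Nat.strong_induction_on with
  | _ d ih =>
    intro lo hi hd hlt
    by_cases h1 : hi - lo = 1
    · have hhi : hi = lo + 1 := by omega
      subst hhi
      rw [pvColsum, if_pos h1]
      refine List.map_congr_left ?_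
      intro j hj
      simp [PySem.List.pyGetD_natCast, pvG]
    · have h0 : ¬ hi ≤ lo := by omega
      rw [pvColsum, if_neg h1, if_neg h0]
      simp only []
      have hmid1 : lo < (lo + hi) / 2 := by omega
      have hmid2 : (lo + hi) / 2 < hi := by omega
      rw [ih ((lo + hi) / 2 - lo) (by omega) lo ((lo + hi) / 2) rfl hmid1,
          ih (hi - (lo + hi) / 2) (by omega) ((lo + hi) / 2) hi rfl hmid2]
      refine List.map_congr_left ?_
      intro j hj
      have hj' : j < w := List.mem_range.mp hj
      simp only [List.getD_eq_getElem?_getD, List.getElem?_map, List.getElem?_range hj',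
        Option.map_some, Option.getD_some]
      rw [← Finset.sum_Ico_consecutive _ (le_of_lt hmid1) (le_of_lt hmid2)]

theorem maxRecSize_nat (map : List (List Int)) :
    maxRecSize map = maxRecSize_alt map := by
  unfold maxRecSize maxRecSize_alt
  split
  · rfl
  · rename_i hguard
    rw [show PySem.List.pyRange 0 ((map.headD []).length : Int) 1
        = (List.range (map.headD []).length).map (fun k : Nat => (k : Int)) by
      simp [PySem.List.pyRange_one]]
    rw [show PySem.List.pyRange 0 (map.length : Int) 1
        = (List.range map.length).map (fun k : Nat => (k : Int)) by
      simp [PySem.List.pyRange_one]]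
    simp only [List.foldl_map, PySem.List.pyGetD_natCast, PySem.List.pySetD_natCast]
    have ho := pv_outer map (map.headD []).length map.length
    simp only [pvG, pvS] at ho
    rw [ho]
    have hn : 0 < map.length := by
      rcases Nat.eq_zero_or_pos map.length with h | h
      · exact absurd (Or.inl h) hguard
      · exact h
    rw [pvColsum_eq map (map.headD []).length map.length 0 map.length rfl hn]
    refine List.map_congr_left ?_
    intro j hj
    have hps := pvS_Ico map map.length j
    simp only [pvS, pvG] at hps
    rw [hps]
    simp [pvG, Nat.Ico_zero_eq_range]

-- ===== VERDICT (by name: the statement is the Claim_ definition above) =====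
theorem maxRecSize_spec : Claim_equal_maxRecSize := by
  intro map _ _
  unfold Spec_maxRecSize
  exact maxRecSize_nat map
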